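-- pv_equiv track=rewrite | github.com/kmanu225/cryptoword | cesar/vigenere_kasiski.py | vigenere_to_cesars
-- ===== SOURCE A (Python) =====
-- def vigenere_to_cesars(text, l):
--     i = 0
--     cesar_texts = []
--     for i in range(l):
--         cesar_text = ""
--         for j in range(i, len(text), l):
--             cesar_text += text[j]
--         cesar_texts.append(cesar_text)
--     return cesar_texts
-- ===== SOURCE B (Python) =====
-- def vigenere_to_cesars(text, l):
--     if l <= 0:
--         return []
--     cosets = [''] * l
--     for idx, ch in enumerate(text):
--         cosets[idx % l] += ch
--     return cosets
-- ===== Notes on version B (the rewrite author's own statement) =====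
-- stated objective: simpler
-- what changed: B replaces A's gather pattern of l separate strided scans over the text by a single pass that scatters each character into coset idx % l of a pre-built list of l accumulators.
import Mathlib
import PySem

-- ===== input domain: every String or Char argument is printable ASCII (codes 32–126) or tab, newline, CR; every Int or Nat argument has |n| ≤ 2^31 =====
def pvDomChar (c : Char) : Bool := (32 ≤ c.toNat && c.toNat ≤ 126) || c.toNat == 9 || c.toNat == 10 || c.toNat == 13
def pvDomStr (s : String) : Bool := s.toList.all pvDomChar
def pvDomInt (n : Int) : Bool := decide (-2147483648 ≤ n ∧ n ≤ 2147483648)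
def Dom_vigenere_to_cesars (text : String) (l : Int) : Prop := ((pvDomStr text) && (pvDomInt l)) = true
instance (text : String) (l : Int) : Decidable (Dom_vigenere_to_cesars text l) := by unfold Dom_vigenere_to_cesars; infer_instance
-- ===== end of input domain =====

-- B distributes the characters in one pass over enumerate(text) into l accumulators (scatter),
-- instead of A's l separate strided scans of the text (gather); same return value, objective: simpler.

-- ===== PORT A =====
-- text[j] never raises here: j ∈ range(i, len(text), l) is always in range, so pyGetD's default is unreachable.
def vigenere_to_cesars (text : String) (l : Int) : List String :=
  (PySem.List.pyRange 0 l 1).foldl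
    (fun cesar_texts i =>
      cesar_texts ++
        [(PySem.List.pyRange i (text.toList.length : Int) l).foldl
          (fun cesar_text j => cesar_text.push (PySem.List.pyGetD text.toList j ' '))
          ""])
    []

-- ===== PORT B =====
def vigenere_to_cesars_alt (text : String) (l : Int) : List String :=
  if l ≤ 0 then []
  else
    (PySem.List.enumerate text.toList).foldl
      (fun cosets p => cosets.modify (PySem.Int.mod p.1 l).toNat (fun s => s.push p.2))
      (List.replicate l.toNat "")

-- ===== PRECONDITION & SPEC =====
def Spec_vigenere_to_cesars (text : String) (l : Int) (out : List String) : Prop := out = vigenere_to_cesars_alt text l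
instance (text : String) (l : Int) (out : List String) : Decidable (Spec_vigenere_to_cesars text l out) := by unfold Spec_vigenere_to_cesars; infer_instance

-- ===== CLAIM (what is proved, stated in full; the proofs are below) =====
def Claim_equal_vigenere_to_cesars : Prop := ∀ (text : String) (l : Int), Dom_vigenere_to_cesars text l → Spec_vigenere_to_cesars text l (vigenere_to_cesars text l)

-- ===== LEMMAS AND PROOFS =====

-- A's inner loop: the Caesar coset gathered by the strided scan starting at i.
def innerA (cs : List Char) (l i : Int) : String :=
  (PySem.List.pyRange i (cs.length : Int) l).foldl
    (fun cesar_text j => cesar_text.push (PySem.List.pyGetD cs j ' ')) ""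

lemma pyRange_pairwise_lt {l : Int} (a b : Int) (hl : 0 < l) :
    (PySem.List.pyRange a b l).Pairwise (· < ·) := by
  rw [PySem.List.pyRange_of_pos a b hl]
  refine List.pairwise_map.mpr (List.pairwise_lt_range.imp ?_)
  intro k1 k2 h
  have : l * (k1 : Int) < l * (k2 : Int) := by
    have : (k1 : Int) < (k2 : Int) := by exact_mod_cast h
    exact mul_lt_mul_of_pos_left this hl
  omega

lemma pyRange_pos_zero_right {l i : Int} (hl : 0 < l) (hi : 0 ≤ i) :
    PySem.List.pyRange i 0 l = [] := by
  rw [PySem.List.pyRange_of_pos _ _ hl]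
  simp [not_lt.2 hi]

-- Appending one character to the text extends exactly the stride whose residue matches.
lemma stride_succ (l i : Int) (n : Nat) (hl : 0 < l) :
    PySem.List.pyRange i ((n : Int) + 1) l
      = PySem.List.pyRange i (n : Int) l
        ++ (if l ∣ (n : Int) - i ∧ i ≤ (n : Int) then [(n : Int)] else []) := by
  have pw1 := pyRange_pairwise_lt i ((n : Int) + 1) hl
  have pw0 := pyRange_pairwise_lt i (n : Int) hl
  have pw2 : (PySem.List.pyRange i (n : Int) l
      ++ (if l ∣ (n : Int) - i ∧ i ≤ (n : Int) then [(n : Int)] else [])).Pairwise (· < ·) := by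
    rw [List.pairwise_append]
    refine ⟨pw0, by split_ifs <;> simp, ?_⟩
    intro x hx y hy
    have hm := (PySem.List.mem_pyRange_iff_of_pos hl x).1 hx
    split_ifs at hy with hc
    · simp only [List.mem_singleton] at hy; omega
    · simp at hy
  have mem : ∀ x, x ∈ PySem.List.pyRange i ((n : Int) + 1) l ↔
      x ∈ PySem.List.pyRange i (n : Int) l
        ++ (if l ∣ (n : Int) - i ∧ i ≤ (n : Int) then [(n : Int)] else []) := by
    intro x
    rw [List.mem_append, PySem.List.mem_pyRange_iff_of_pos hl,
      PySem.List.mem_pyRange_iff_of_pos hl]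
    constructor
    · rintro ⟨h1, h2, h3⟩
      by_cases hx : x < (n : Int)
      · exact Or.inl ⟨h1, hx, h3⟩
      · have hxn : x = (n : Int) := by omega
        subst hxn
        right
        rw [if_pos ⟨h3, h1⟩]
        simp
    · rintro (⟨h1, h2, h3⟩ | hx)
      · exact ⟨h1, by omega, h3⟩
      · split_ifs at hx with hc
        · simp only [List.mem_singleton] at hx
          subst hx
          exact ⟨hc.2, by omega, hc.1⟩
        · simp at hx
  refine List.Perm.eq_of_pairwise (fun a b _ _ h1 h2 => (lt_asymm h1 h2).elim) pw1 pw2 ?_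
  exact (List.perm_ext_iff_of_nodup (pw1.imp fun h => ne_of_lt h)
    (pw2.imp fun h => ne_of_lt h)).2 mem

lemma inner_append (cs : List Char) (c : Char) (l i : Int)
    (hl : 0 < l) (hi : 0 ≤ i) (hil : i < l) :
    innerA (cs ++ [c]) l i
      = if l ∣ (cs.length : Int) - i then (innerA cs l i).push c else innerA cs l i := by
  unfold innerA
  have hlen : (((cs ++ [c]).length : Int)) = (cs.length : Int) + 1 := by simp
  rw [hlen, stride_succ l i cs.length hl]
  have hcong : ∀ acc : String, ∀ x ∈ PySem.List.pyRange i (cs.length : Int) l,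
      acc.push (PySem.List.pyGetD (cs ++ [c]) x ' ')
        = acc.push (PySem.List.pyGetD cs x ' ') := by
    intro acc x hx
    have hm := (PySem.List.mem_pyRange_iff_of_pos hl x).1 hx
    rw [PySem.List.pyGetD_eq_getElem _ _ (by omega) (by simp; omega),
      PySem.List.pyGetD_eq_getElem _ _ (by omega) (by omega)]
    congr 1
    exact List.getElem_append_left (by omega)
  have hfold := PySem.List.foldl_congr_mem (PySem.List.pyRange i (cs.length : Int) l)
    (fun cesar_text j => cesar_text.push (PySem.List.pyGetD (cs ++ [c]) j ' '))
    (fun cesar_text j => cesar_text.push (PySem.List.pyGetD cs j ' ')) "" hcong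
  by_cases hd : l ∣ (cs.length : Int) - i
  · have hile : i ≤ (cs.length : Int) := by
      rcases hd with ⟨t, ht⟩
      by_cases h : 0 ≤ t
      · have : 0 ≤ l * t := mul_nonneg hl.le h
        omega
      · have : l * t ≤ l * (-1) := by
          have : t ≤ -1 := by omega
          exact mul_le_mul_of_nonneg_left this hl.le
        omega
    rw [if_pos ⟨hd, hile⟩, if_pos hd, List.foldl_concat, hfold]
    congr 1
    rw [PySem.List.pyGetD_eq_getElem _ _ (by omega) (by simp)]
    exact List.getElem_concat_length (by simp) _
  · rw [if_neg (fun h => hd h.1), if_neg hd, List.append_nil]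
    exact hfold

lemma mod_cond (l n : Int) (j : Nat) (hl : 0 < l) (hj : (j : Int) < l) :
    (PySem.Int.mod n l).toNat = j ↔ l ∣ n - (j : Int) := by
  rw [PySem.Int.mod_eq_emod_of_pos hl]
  have hnn : 0 ≤ n % l := Int.emod_nonneg n (ne_of_gt hl)
  constructor
  · intro h
    have hje : n % l = (j : Int) := by omega
    have : l ∣ n - n % l := by
      rw [Int.emod_def]
      ring_nf
      exact Dvd.intro _ rfl
    rwa [hje] at this
  · intro h
    have h0 : (n - (j : Int)) % l = 0 := Int.emod_eq_zero_of_dvd h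
    have h1 : n % l = (j : Int) % l := Int.emod_eq_emod_iff_emod_sub_eq_zero.2 h0
    rw [h1, Int.emod_eq_of_lt (by omega) hj]
    omega

lemma key (l : Int) (hl : 0 < l) (cs : List Char) :
    (PySem.List.enumerate cs).foldl
        (fun cosets p => cosets.modify (PySem.Int.mod p.1 l).toNat (fun s => s.push p.2))
        (List.replicate l.toNat "")
      = (PySem.List.pyRange 0 l 1).map (fun i => innerA cs l i) := by
  induction cs using List.reverseRecOn with
  | nil =>
    rw [PySem.List.enumerate_nil, List.foldl_nil]
    have : (PySem.List.pyRange 0 l 1).map (fun i => innerA ([] : List Char) l i)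
        = (PySem.List.pyRange 0 l 1).map (fun _ => "") := by
      apply List.map_congr_left
      intro i hi
      rw [PySem.List.mem_pyRange_one] at hi
      unfold innerA
      simp only [List.length_nil, Nat.cast_zero]
      rw [pyRange_pos_zero_right hl hi.1, List.foldl_nil]
    rw [this, List.map_const', PySem.List.length_pyRange_one]
    congr 1
    omega
  | append_singleton cs c ih =>
    rw [PySem.List.enumerate_append, List.foldl_append, ih,
      PySem.List.enumerate_cons, PySem.List.enumerate_nil, List.foldl_cons, List.foldl_nil]
    apply List.ext_getElem
    · simp
    · intro j h1 h2
      have hj : (j : Int) < l := by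
        rw [List.length_modify, List.length_map, PySem.List.length_pyRange_one] at h1
        omega
      rw [List.getElem_modify]
      simp only [List.getElem_map, PySem.List.getElem_pyRange_one, zero_add]
      rw [inner_append cs c l (j : Int) hl (by omega) hj]
      have hcond := mod_cond l (cs.length : Int) j hl hj
      by_cases hd : l ∣ (cs.length : Int) - (j : Int)
      · rw [if_pos hd, if_pos (hcond.2 hd)]
      · rw [if_neg hd, if_neg (fun h => hd (hcond.1 h))]

-- ===== VERDICT (by name: the statement is the Claim_ definition above) =====
theorem vigenere_to_cesars_spec : Claim_equal_vigenere_to_cesars := by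
  intro text l _
  unfold Spec_vigenere_to_cesars vigenere_to_cesars vigenere_to_cesars_alt
  by_cases hl : l ≤ 0
  · rw [if_pos hl, PySem.List.pyRange_one_eq_nil hl, List.foldl_nil]
  · rw [if_neg hl]
    have hl' : 0 < l := by omega
    have hA := PySem.List.foldl_append_singleton_eq_map
      (fun i => innerA text.toList l i) (PySem.List.pyRange 0 l 1) []
    have hK := key l hl' text.toList
    simp only [innerA] at hA hK
    rw [hA, List.nil_append]
    exact hK.symm
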